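-- pv_equiv track=rewrite | github.com/wo/var | lssm.py | newtermlists
-- ===== SOURCE A (Python) =====
-- def newtermlists(iterable, length):
--     # like permutations_with_repetition(iterable, length, False), but
--     # also insensitive to order, i.e. 'ABCD' => AAA AAB ABC
--     pool = tuple(iterable)
--     n = len(pool)
--     if not n and length:
--         return
--     indices = [0] * length
--     yield tuple(pool[i] for i in indices)
--     while True:
--         for i in reversed(range(length)):
--             if indices[i] != n-1 and indices[i] == indices[i-1]:
--                 break
--         else:
--             return
--         indices[i] += 1
--         for j in range(i+1, length):
--             indices[j] = indices[i]
--         for j in range(1,n):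
--             if indices.count(j) > indices.count(j-1):
--                 break
--         else:
--             yield tuple(pool[i] for i in indices)
-- ===== SOURCE B (Python) =====
-- def _partitions(remaining, maxpart, maxparts):
--     # partitions of `remaining` into at most `maxparts` non-increasing parts,
--     # each part <= maxpart, in reverse-lexicographic order
--     if remaining <= 0:
--         yield []
--         return
--     if maxparts <= 0:
--         return
--     for p in range(min(remaining, maxpart), 0, -1):
--         for rest in _partitions(remaining - p, p, maxparts - 1):
--             yield [p] + rest
--
-- def newtermlists(iterable, length):
--     pool = tuple(iterable)
--     if not pool and length:
--         return
--     for parts in _partitions(length, length, len(pool)):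
--         out = []
--         for k, p in enumerate(parts):
--             out.extend([pool[k]] * p)
--         yield tuple(out)
-- ===== Notes on version B (the rewrite author's own statement) =====
-- stated objective: alternative
-- what changed: A walks every non-decreasing index tuple with an ad-hoc successor and filters by multiset counts; B directly enumerates the integer partitions of length into at most len(iterable) parts by recursion (reverse-lexicographic) and expands each partition into the output tuple.
import Mathlib
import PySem

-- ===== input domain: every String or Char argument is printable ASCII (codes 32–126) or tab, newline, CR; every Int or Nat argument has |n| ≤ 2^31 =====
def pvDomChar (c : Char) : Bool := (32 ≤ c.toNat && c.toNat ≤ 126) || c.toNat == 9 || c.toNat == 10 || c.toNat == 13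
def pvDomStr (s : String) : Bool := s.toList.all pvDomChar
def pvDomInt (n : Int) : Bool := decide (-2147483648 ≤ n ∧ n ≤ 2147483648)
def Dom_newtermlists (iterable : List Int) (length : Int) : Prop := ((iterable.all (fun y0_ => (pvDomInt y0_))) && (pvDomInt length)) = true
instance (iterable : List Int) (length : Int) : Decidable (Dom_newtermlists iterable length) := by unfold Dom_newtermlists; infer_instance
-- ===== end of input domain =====

-- B replaces A's walk over all index tuples (with a count filter) by a direct recursive
-- enumeration of the integer partitions of `length` into at most `len(iterable)` parts.

-- ===== PORT A =====

-- tuple(pool[i] for i in indices)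
def pvTuple (pool t : List Int) : List Int :=
  t.map (fun i => (PySem.List.pyGet? pool i).getD 0)

-- the loop body's condition 'indices[i] != n-1 and indices[i] == indices[i-1]'
def pvCond (n : Int) (t : List Int) (i : Nat) : Bool :=
  decide (PySem.List.pyGet? t (i : Int) ≠ some (n-1) ∧
          PySem.List.pyGet? t (i : Int) = PySem.List.pyGet? t ((i : Int) - 1))

-- 'for i in reversed(range(length)): if …: break / else: return'
def findSplit (n : Int) (t : List Int) : Nat → Option Nat
  | 0 => none
  | m+1 => if pvCond n t m then some m else findSplit n t m

-- 'indices[i] += 1; for j in range(i+1, length): indices[j] = indices[i]'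
def pvUpd (t : List Int) (i : Nat) : List Int :=
  let v := (PySem.List.pyGet? t (i : Int)).getD 0 + 1
  (List.range' (i+1) (t.length - (i+1))).foldl (fun a j => a.set j v) (t.set i v)

-- 'for j in range(1,n): if indices.count(j) > indices.count(j-1): break / else: yield'
def pvPass (n : Int) (t : List Int) : Bool :=
  (PySem.List.pyRange 1 n 1).all
    (fun j => !(decide (PySem.List.count t (j-1) < PySem.List.count t j)))

-- 'while True: …' (fuel-bounded; 2^length iterations always suffice)
def pvLoop (pool : List Int) (n : Int) (L : Nat) : Nat → List Int → List (List Int)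
  | 0, _ => []
  | f+1, t =>
    match findSplit n t L with
    | none => []
    | some i =>
      let t' := pvUpd t i
      (if pvPass n t' then [pvTuple pool t'] else []) ++ pvLoop pool n L f t'

def newtermlists (iterable : List Int) (length : Int) : List (List Int) :=
  let n : Int := iterable.length
  if n = 0 ∧ length ≠ 0 then []
  else
    let indices := List.replicate length.toNat (0 : Int)
    pvTuple iterable indices :: pvLoop iterable n length.toNat (2 ^ length.toNat) indices

-- ===== PORT B =====

-- needed by pvParts' termination proof
theorem pvMemCountdown {p m : Int} (h : p ∈ PySem.List.pyRange m 0 (-1)) : 0 < p ∧ p ≤ m :=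
  (PySem.List.mem_pyRange_neg_one.mp h)

-- '_partitions(remaining, maxpart, maxparts)'
def pvParts (remaining maxpart maxparts : Int) : List (List Int) :=
  if h0 : remaining ≤ 0 then [[]]
  else if maxparts ≤ 0 then []
  else
    (PySem.List.pyRange (min remaining maxpart) 0 (-1)).attach.flatMap
      (fun p => (pvParts (remaining - p.1) p.1 (maxparts - 1)).map (fun rest => p.1 :: rest))
termination_by remaining.toNat
decreasing_by
  have hp := pvMemCountdown p.2
  omega

-- 'out = []; for k, p in enumerate(parts): out.extend([pool[k]] * p)'
def pvBuild (pool parts : List Int) : List Int :=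
  (PySem.List.enumerate parts 0).foldl
    (fun out kp => out ++ List.replicate kp.2.toNat ((PySem.List.pyGet? pool kp.1).getD 0)) []

def newtermlists_alt (iterable : List Int) (length : Int) : List (List Int) :=
  if iterable.length = 0 ∧ length ≠ 0 then []
  else (pvParts length length iterable.length).map (pvBuild iterable)

-- ===== PRECONDITION & SPEC =====
def Spec_newtermlists (iterable : List Int) (length : Int) (out : List (List Int)) : Prop := out = newtermlists_alt iterable length
instance (iterable : List Int) (length : Int) (out : List (List Int)) : Decidable (Spec_newtermlists iterable length out) := by unfold Spec_newtermlists; infer_instance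

-- ===== CLAIM (what is proved, stated in full; the proofs are below) =====
def Claim_equal_newtermlists : Prop := ∀ (iterable : List Int) (length : Int), Dom_newtermlists iterable length → Spec_newtermlists iterable length (newtermlists iterable length)

-- ===== LEMMAS AND PROOFS =====

-- countdown list r, r-1, …, 1
def pvDesc : Nat → List Nat
  | 0 => []
  | n+1 => (n+1) :: pvDesc n

theorem pvMem_desc {c m : Nat} : c ∈ pvDesc m ↔ 1 ≤ c ∧ c ≤ m := by
  induction m with
  | zero => simp [pvDesc]; omega
  | succ m ih => simp [pvDesc, ih]; omega

-- all compositions of r into at most k positive parts, in A's (reverse-lexicographic) order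
def pvComps : Nat → Nat → List (List Nat)
  | 0, _ => [[]]
  | _+1, 0 => []
  | r+1, k+1 =>
    (pvDesc (r+1)).attach.flatMap
      (fun c => (pvComps (r+1 - c.1) k).map (fun cs => c.1 :: cs))
termination_by r _ => r
decreasing_by
  have := pvMem_desc.mp c.2
  omega

-- the index tuple realising a composition, starting at value `start`
def pvStateOf (start : Int) : List Nat → List Int
  | [] => []
  | c :: cs => List.replicate c start ++ pvStateOf (start+1) cs

-- the last composition A visits (the reverse-lexicographically least one)
def pvLastC : Nat → Nat → List Nat
  | 0, _ => []
  | _+1, 0 => []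
  | r+1, 1 => [r+1]
  | r+1, k+2 => 1 :: pvLastC r (k+1)

-- one iteration of A's while-loop: t' is reached from t
def pvSucc (n : Int) (L : Nat) (t t' : List Int) : Prop :=
  ∃ i, findSplit n t L = some i ∧ pvUpd t i = t'

def pvYields (pool : List Int) (n : Int) (ts : List (List Int)) : List (List Int) :=
  ts.flatMap (fun t => if pvPass n t then [pvTuple pool t] else [])

theorem pvFlatMap_attach {α β : Type} (l : List α) (g : α → List β) :
    (l.attach).flatMap (fun c => g c.1) = l.flatMap g := by
  induction l with
  | nil => rfl
  | cons x xs ih => simp_all [List.attach_cons, List.flatMap_map]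

theorem pvComps_succ (r k : Nat) :
    pvComps (r+1) (k+1) =
      (pvDesc (r+1)).flatMap (fun c => (pvComps (r+1 - c) k).map (fun cs => c :: cs)) := by
  rw [pvComps]
  exact pvFlatMap_attach (pvDesc (r+1)) (fun c => (pvComps (r+1 - c) k).map (fun cs => c :: cs))

theorem pvDesc_succ (m : Nat) : pvDesc (m+1) = (m+1) :: pvDesc m := rfl

theorem pvDesc_pos (m : Nat) (h : 1 ≤ m) : pvDesc m = m :: pvDesc (m-1) := by
  cases m with
  | zero => omega
  | succ m => rfl

theorem pvComps_head (r k : Nat) (hr : 1 ≤ r) (hk : 1 ≤ k) :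
    ∃ rest, pvComps r k = [r] :: rest := by
  obtain ⟨r, rfl⟩ : ∃ r', r = r' + 1 := ⟨r - 1, by omega⟩
  obtain ⟨k, rfl⟩ : ∃ k', k = k' + 1 := ⟨k - 1, by omega⟩
  have h0 : pvComps 0 k = [[]] := by simp [pvComps]
  rw [pvComps_succ, pvDesc_succ, List.flatMap_cons, Nat.sub_self, h0]
  exact ⟨_, rfl⟩

theorem pvComps_ne_nil (r k : Nat) (h : r = 0 ∨ 1 ≤ k) : pvComps r k ≠ [] := by
  rcases Nat.eq_zero_or_pos r with hr | hr
  · subst hr; simp [pvComps]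
  · obtain ⟨rest, hrest⟩ := pvComps_head r k hr (by omega)
    simp [hrest]

theorem pvComps_one (r : Nat) (hr : 1 ≤ r) : pvComps r 1 = [[r]] := by
  obtain ⟨r, rfl⟩ : ∃ r', r = r' + 1 := ⟨r - 1, by omega⟩
  rw [pvComps_succ, pvDesc_succ, List.flatMap_cons]
  have hz : ∀ m, m ≤ r → (pvDesc m).flatMap (fun c => (pvComps (r+1 - c) 0).map (fun cs => c :: cs)) = [] := by
    intro m
    induction m with
    | zero => simp [pvDesc]
    | succ m ih =>
      intro hm
      rw [pvDesc_succ, List.flatMap_cons, ih (by omega)]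
      obtain ⟨d, hd⟩ : ∃ d, r + 1 - (m+1) = d + 1 := ⟨r - m - 1, by omega⟩
      rw [hd]
      simp [pvComps]
  rw [hz r (le_refl r)]
  simp [pvComps]

theorem pvComps_getLast (r k : Nat) (h : r = 0 ∨ 1 ≤ k) :
    (pvComps r k).getLast? = some (pvLastC r k) := by
  induction r using Nat.strong_induction_on generalizing k with
  | _ r ih =>
    match r, k with
    | 0, k => simp [pvComps, pvLastC]
    | r+1, 0 => omega
    | r+1, 1 => rw [pvComps_one (r+1) (by omega)]; rfl
    | r+1, k+2 =>
      rw [pvComps_succ]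
      have h1 : ∀ m, 1 ≤ m → m ≤ r + 1 →
          ((pvDesc m).flatMap (fun c => (pvComps (r+1 - c) (k+1)).map (fun cs => c :: cs))).getLast?
            = some (1 :: pvLastC r (k+1)) := by
        intro m
        induction m with
        | zero => omega
        | succ m ihm =>
          intro hx hm
          rw [pvDesc_succ, List.flatMap_cons]
          rcases Nat.eq_zero_or_pos m with hm0 | hm0
          · subst hm0
            simp only [pvDesc, List.flatMap_nil, List.append_nil]
            rw [List.getLast?_map]
            have he : r + 1 - (0+1) = r := by omega
            rw [he, ih r (by omega) (k+1) (Or.inr (by omega))]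
            rfl
          · rw [List.getLast?_append_of_ne_nil, ihm hm0 (by omega)]
            intro hnil
            have h2 : 1 ≤ m := hm0
            -- flatMap over pvDesc m contains the nonempty block c = m
            have : pvComps (r+1-m) (k+1) ≠ [] := pvComps_ne_nil _ _ (Or.inr (by omega))
            obtain ⟨cs, hcs⟩ := List.exists_mem_of_ne_nil _ this
            have : (m :: cs) ∈ (pvDesc m).flatMap (fun c => (pvComps (r+1 - c) (k+1)).map (fun cs => c :: cs)) := by
              apply List.mem_flatMap.mpr
              exact ⟨m, pvMem_desc.mpr ⟨hm0, le_refl m⟩, List.mem_map.mpr ⟨cs, hcs, rfl⟩⟩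
            rw [hnil] at this
            simp at this
      rw [h1 (r+1) (by omega) (le_refl _)]
      rfl

theorem pvMem_comps {cs : List Nat} {r k : Nat} (h : cs ∈ pvComps r k) :
    cs.sum = r ∧ (∀ x ∈ cs, 1 ≤ x) ∧ cs.length ≤ k := by
  induction r using Nat.strong_induction_on generalizing cs k with
  | _ r ih =>
    match r, k with
    | 0, k => simp [pvComps] at h; simp [h]
    | r+1, 0 => simp [pvComps] at h
    | r+1, k+1 =>
      rw [pvComps_succ] at h
      obtain ⟨c, hc, h⟩ := List.mem_flatMap.mp h
      obtain ⟨cs', hcs', rfl⟩ := List.mem_map.mp h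
      have hcd := pvMem_desc.mp hc
      have := ih (r+1-c) (by omega) hcs'
      refine ⟨?_, ?_, ?_⟩
      · simp [List.sum_cons]; omega
      · intro x hx
        rcases List.mem_cons.mp hx with rfl | hx
        · omega
        · exact this.2.1 x hx
      · simp [List.length_cons]; omega

theorem pvComps_length_le (r k : Nat) : (pvComps r k).length ≤ 2 ^ r := by
  induction r using Nat.strong_induction_on generalizing k with
  | _ r ih =>
    match r, k with
    | 0, k => simp [pvComps]
    | r+1, 0 => simp [pvComps]
    | r+1, k+1 =>
      rw [pvComps_succ]
      have hb : ∀ m, m ≤ r + 1 →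
          ((pvDesc m).flatMap (fun c => (pvComps (r+1 - c) k).map (fun cs => c :: cs))).length
            ≤ 2 ^ (r+1) - 2 ^ (r+1-m) := by
        intro m
        induction m with
        | zero => simp [pvDesc]
        | succ m ihm =>
          intro hm
          rw [pvDesc_succ, List.flatMap_cons, List.length_append, List.length_map]
          have h1 := ih (r+1-(m+1)) (by omega) k
          have h2 := ihm (by omega)
          have h3 : (2:Nat) ^ (r+1-(m+1)) ≤ 2 ^ (r+1) := Nat.pow_le_pow_right (by omega) (by omega)
          have h4 : (2:Nat) ^ (r+1-m) = 2 ^ (r+1-(m+1)) + 2 ^ (r+1-(m+1)) := by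
            have : r+1-m = (r+1-(m+1)) + 1 := by omega
            rw [this, pow_succ]; omega
          have h7 : (2:Nat) ^ (r+1-m) ≤ 2 ^ (r+1) := Nat.pow_le_pow_right (by omega) (by omega)
          omega
      have := hb (r+1) (le_refl _)
      have h5 : (0:Nat) < 2 ^ (r+1) := Nat.two_pow_pos _
      have h6 : (2:Nat) ^ (r+1-(r+1)) = 1 := by simp
      omega

theorem pvLastC_sum (r k : Nat) (hk : 1 ≤ k) : (pvLastC r k).sum = r := by
  induction r using Nat.strong_induction_on generalizing k with
  | _ r ih =>
    match r, k with
    | 0, k => simp [pvLastC]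
    | r+1, 0 => omega
    | r+1, 1 => simp [pvLastC]
    | r+1, k+2 =>
      have := ih r (by omega) (k+1) (by omega)
      simp only [pvLastC, List.sum_cons, this]
      omega

theorem pvStateOf_length (start : Int) (c : List Nat) :
    (pvStateOf start c).length = c.sum := by
  induction c generalizing start with
  | nil => rfl
  | cons x xs ih => simp [pvStateOf, ih]

theorem pvMem_stateOf_ge {x : Int} {start : Int} {c : List Nat} (h : x ∈ pvStateOf start c) :
    start ≤ x := by
  induction c generalizing start with
  | nil => simp [pvStateOf] at h
  | cons y ys ih =>
    rw [pvStateOf, List.mem_append] at h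
    rcases h with h | h
    · rw [List.eq_of_mem_replicate h]
    · have := ih h; omega



theorem pvCond_eq (n : Int) (t : List Int) (j : Nat) (hj : 1 ≤ j) (hlt : j < t.length) :
    pvCond n t j = decide ((t[j]? ≠ some (n-1)) ∧ t[j]? = t[j-1]?) := by
  unfold pvCond
  have h1 : PySem.List.pyGet? t (j : Int) = t[j]? := PySem.List.pyGet?_natCast t j
  have he : (j : Int) - 1 = ((j - 1 : Nat) : Int) := by omega
  have h2 : PySem.List.pyGet? t ((j : Int) - 1) = t[j-1]? := by
    rw [he]; exact PySem.List.pyGet?_natCast t (j-1)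
  rw [h1, h2]

theorem pvCond_zero (n : Int) (t : List Int) :
    pvCond n t 0 = decide ((t[0]? ≠ some (n-1)) ∧ t[0]? = t.getLast?) := by
  unfold pvCond
  have h1 : PySem.List.pyGet? t ((0 : Nat) : Int) = t[0]? := PySem.List.pyGet?_natCast t 0
  have h2 : PySem.List.pyGet? t (((0 : Nat) : Int) - 1) = t.getLast? := by
    norm_num
    exact PySem.List.pyGet?_neg_one t
  rw [h1, h2]

theorem findSplit_eq_none {n : Int} {t : List Int} (m : Nat)
    (h : ∀ j, j < m → pvCond n t j = false) : findSplit n t m = none := by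
  induction m with
  | zero => rfl
  | succ m ih =>
    rw [findSplit, h m (by omega)]
    simp only [Bool.false_eq_true, if_false]
    exact ih (fun j hj => h j (by omega))

theorem findSplit_eq_some {n : Int} {t : List Int} {i : Nat} (m : Nat)
    (hi : i < m) (hc : pvCond n t i = true)
    (h : ∀ j, i < j → j < m → pvCond n t j = false) : findSplit n t m = some i := by
  induction m with
  | zero => omega
  | succ m ih =>
    rcases Nat.lt_or_ge i m with hlt | hge
    · rw [findSplit, h m (by omega) (by omega)]
      simp only [Bool.false_eq_true, if_false]
      exact ih hlt (fun j h1 h2 => h j h1 (by omega))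
    · have : i = m := by omega
      subst this
      rw [findSplit, hc]
      simp

theorem pvTakeSet (s : List Int) (m : Nat) (v : Int) (h : m < s.length) :
    (s.set m v).take (m+1) = s.take m ++ [v] := by
  rw [List.take_add_one]
  congr 1
  · rw [List.take_set]
    exact List.set_eq_of_length_le (by simp)
  · simp [List.getElem?_set_self', List.getElem?_eq_getElem h]

theorem pvSet_range' (v : Int) : ∀ (d : Nat) (m : Nat) (s : List Int), m + d = s.length →
    (List.range' m d).foldl (fun a j => a.set j v) s = s.take m ++ List.replicate d v := by
  intro d
  induction d with
  | zero =>
    intro m s h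
    have h2 : s.take m = s := List.take_of_length_le (by omega)
    simp [h2]
  | succ d ih =>
    intro m s h
    rw [List.range'_succ, List.foldl_cons]
    rw [ih (m+1) (s.set m v) (by simp; omega)]
    rw [pvTakeSet s m v (by omega)]
    rw [List.append_assoc]
    rfl

theorem pvUpd_eq (t : List Int) (i : Nat) (hi : i < t.length) :
    pvUpd t i = t.take i ++ List.replicate (t.length - i) (t[i] + 1) := by
  unfold pvUpd
  have h1 : PySem.List.pyGet? t (i : Int) = some t[i] := by
    rw [PySem.List.pyGet?_natCast t i]; simp [List.getElem?_eq_getElem hi]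
  rw [h1]
  simp only [Option.getD_some]
  rw [pvSet_range' (t[i] + 1) (t.length - (i+1)) (i+1) (t.set i (t[i]+1)) (by simp; omega)]
  rw [pvTakeSet t i (t[i]+1) hi]
  rw [List.append_assoc]
  congr 1
  have h2 : t.length - i = (t.length - (i+1)) + 1 := by omega
  rw [h2, List.replicate_succ]
  rfl

def pvNoSplit (n vl : Int) : List Int → Prop
  | [] => True
  | x :: xs => ¬(x ≠ n-1 ∧ x = vl) ∧ pvNoSplit n x xs

theorem pvNoSplit_replicate (n vl : Int) (m : Nat) : pvNoSplit n vl (List.replicate m (n-1)) := by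
  induction m generalizing vl with
  | zero => trivial
  | succ m ih => exact ⟨fun h => h.1 rfl, ih (n-1)⟩

theorem pvNoSplit_lastS (n : Int) : ∀ (r k : Nat) (start : Int), start = n - k → 1 ≤ k →
    pvNoSplit n (start - 1) (pvStateOf start (pvLastC r k)) := by
  intro r
  induction r using Nat.strong_induction_on with
  | _ r ih =>
    intro k start hs hk
    match r, k with
    | 0, k => trivial
    | r+1, 0 => omega
    | r+1, 1 =>
      have hl : pvStateOf start (pvLastC (r+1) 1) = List.replicate (r+1) start := by
        simp [pvLastC, pvStateOf]
      have hstart : start = n - 1 := by push_cast at hs; omega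
      rw [hl, hstart]
      exact pvNoSplit_replicate n (n-1-1) (r+1)
    | r+1, k+2 =>
      have hl : pvStateOf start (pvLastC (r+1) (k+2)) = start :: pvStateOf (start+1) (pvLastC r (k+1)) := by
        simp [pvLastC, pvStateOf]
      rw [hl]
      refine ⟨fun h => by omega, ?_⟩
      have := ih r (by omega) (k+1) (start+1) (by push_cast at hs ⊢; omega) (by omega)
      simpa using this

-- positions inside a split-free suffix never satisfy the loop's break condition
theorem pvCond_false_of_noSplit (n : Int) :
    ∀ (l pre : List Int) (vl : Int), pre ≠ [] → pre.getLast? = some vl → pvNoSplit n vl l →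
    ∀ (j : Nat), pre.length ≤ j → j < pre.length + l.length → pvCond n (pre ++ l) j = false := by
  intro l
  induction l with
  | nil => intro pre vl _ _ _ j h1 h2; simp at h2; omega
  | cons x xs ih =>
    intro pre vl hpre hlast hns j h1 h2
    rcases Nat.eq_or_lt_of_le h1 with rfl | hgt
    · -- j = pre.length : compare x with pre's last element vl
      have hj1 : 1 ≤ pre.length := List.length_pos_iff.mpr hpre
      rw [pvCond_eq n _ pre.length hj1 (by simp)]
      have hx : (pre ++ x :: xs)[pre.length]? = some x := by
        rw [List.getElem?_append_right (le_refl _)]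
        simp
      have hprev : (pre ++ x :: xs)[pre.length - 1]? = some vl := by
        rw [List.getElem?_append_left (by omega)]
        rw [← hlast, List.getLast?_eq_getElem?]
      rw [hx, hprev]
      simp only [decide_eq_false_iff_not]
      intro hcontra
      exact hns.1 ⟨fun hne => hcontra.1 (by rw [hne]), by injection hcontra.2⟩
    · -- j > pre.length : recurse with pre ++ [x]
      have := ih (pre ++ [x]) x (by simp) (by simp) hns.2 j (by simp; omega) (by simp at h2 ⊢; omega)
      simpa using this


theorem pvYields_cons (pool : List Int) (n : Int) (t : List Int) (ts : List (List Int)) :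
    pvYields pool n (t :: ts) = (if pvPass n t then [pvTuple pool t] else []) ++ pvYields pool n ts := by
  simp [pvYields]

-- one fuel unit per loop iteration along a successor chain
theorem pvRun (pool : List Int) (n : Int) (L : Nat) :
    ∀ (ts : List (List Int)) (t : List Int) (f : Nat), List.IsChain (pvSucc n L) (t :: ts) →
      pvLoop pool n L (ts.length + f) t
        = pvYields pool n ts ++ pvLoop pool n L f ((t :: ts).getLast (by simp)) := by
  intro ts
  induction ts with
  | nil => intro t f _; simp [pvYields]
  | cons t' ts ih =>
    intro t f hch
    rcases List.isChain_cons_cons.mp hch with ⟨⟨i, hfind, hupd⟩, hch'⟩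
    have hfuel : (t' :: ts).length + f = (ts.length + f) + 1 := by simp; omega
    rw [hfuel, pvLoop, hfind]
    simp only [hupd]
    rw [ih t' f hch', pvYields_cons]
    rw [List.append_assoc]
    simp [List.getLast_cons]

theorem pvGetLast?_append_replicate_succ (P : List Int) (start : Int) (m : Nat) :
    (P ++ List.replicate (m+1) start).getLast? = some start := by
  rw [List.getLast?_append_of_ne_nil (l₁ := P) (by simp), List.replicate_succ']
  exact List.getLast?_concat

-- the loop's transition from the last state of a sub-block to the head of the next
theorem pvBoundarySucc (n : Int) (P I : List Int) (start : Int) (m : Nat)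
    (hm : 1 ≤ m) (hstart : start ≠ n - 1) (hns : pvNoSplit n start I) :
    pvSucc n (P.length + (m+1) + I.length)
      (P ++ List.replicate (m+1) start ++ I)
      (P ++ List.replicate m start ++ List.replicate (I.length + 1) (start+1)) := by
  set p := P.length with hp
  set t := P ++ List.replicate (m+1) start ++ I with ht
  have htlen : t.length = p + (m+1) + I.length := by
    rw [ht]; simp [hp]; omega
  have hval : ∀ j, p ≤ j → j < p + (m+1) → t[j]? = some start := by
    intro j h1 h2
    rw [ht]
    rw [List.getElem?_append_left (show j < (P ++ List.replicate (m+1) start).length by simp; omega)]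
    rw [List.getElem?_append_right (show P.length ≤ j from h1)]
    rw [List.getElem?_replicate, if_pos (by omega)]
  refine ⟨p + m, ?_, ?_⟩
  · apply findSplit_eq_some
    · omega
    · rw [pvCond_eq n t (p + m) (by omega) (by omega)]
      rw [hval (p + m) (by omega) (by omega), hval (p + m - 1) (by omega) (by omega)]
      simp [hstart]
    · intro j hj1 hj2
      have := pvCond_false_of_noSplit n I (P ++ List.replicate (m+1) start) start
        (by simp) (pvGetLast?_append_replicate_succ P start m)
        hns j (show (P ++ List.replicate (m+1) start).length ≤ j by simp; omega)
        (show j < (P ++ List.replicate (m+1) start).length + I.length by simp; omega)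
      rw [ht]
      exact this
  · have hi : p + m < t.length := by omega
    rw [pvUpd_eq t (p + m) hi]
    have hgv : t[p + m] = start := by
      have := hval (p + m) (by omega) (by omega)
      rw [List.getElem?_eq_getElem hi] at this
      injection this
    have htake : t.take (p + m) = P ++ List.replicate m start := by
      rw [ht, List.take_append, List.take_append]
      rw [List.take_of_length_le (show P.length ≤ p + m by omega)]
      rw [List.take_replicate]
      rw [show p + m - P.length = m from by omega]
      rw [show min m (m+1) = m from by omega]
      rw [show p + m - (P ++ List.replicate (m+1) start).length = 0 from by simp; omega]
      simp
    rw [htake, hgv, htlen]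
    rw [show p + (m+1) + I.length - (p + m) = I.length + 1 from by omega]


-- consecutive states that A visits are loop-successors of one another
theorem pvChainComps (n : Int) (L : Nat) :
    ∀ (r k : Nat) (P : List Int) (start : Int),
      start = n - (k : Int) →
      L = P.length + r →
      List.IsChain (pvSucc n L) ((pvComps r k).map (fun c => P ++ pvStateOf start c)) := by
  intro r
  induction r using Nat.strong_induction_on with
  | _ r ih =>
    intro k P start hs hL
    match r, k with
    | 0, k =>
      rw [show pvComps 0 k = [[]] from by simp [pvComps], List.map_cons, List.map_nil]
      exact List.isChain_singleton _
    | r+1, 0 =>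
      rw [show pvComps (r+1) 0 = [] from by simp [pvComps], List.map_nil]
      exact List.isChain_nil
    | r+1, k+1 =>
      rw [pvComps_succ]
      have hrw : ∀ (c : Nat) (cs : List Nat),
          P ++ pvStateOf start (c :: cs) = (P ++ List.replicate c start) ++ pvStateOf (start+1) cs := by
        intro c cs; rw [pvStateOf, ← List.append_assoc]
      have hblock : ∀ (c : Nat), 1 ≤ c → c ≤ r+1 →
          List.IsChain (pvSucc n L)
            (((pvComps (r+1-c) k).map (fun cs => c :: cs)).map (fun c' => P ++ pvStateOf start c')) := by
        intro c hc1 hc2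
        rw [List.map_map]
        have : ((fun c' => P ++ pvStateOf start c') ∘ (fun cs => c :: cs))
            = (fun cs => (P ++ List.replicate c start) ++ pvStateOf (start+1) cs) := by
          funext cs; simp only [Function.comp]; exact hrw c cs
        rw [this]
        exact ih (r+1-c) (by omega) k (P ++ List.replicate c start) (start+1)
          (by push_cast at hs ⊢; omega) (by simp; omega)
      have main : ∀ m, m ≤ r+1 →
          List.IsChain (pvSucc n L)
            (((pvDesc m).flatMap (fun c => (pvComps (r+1-c) k).map (fun cs => c :: cs))).map
              (fun c' => P ++ pvStateOf start c')) := by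
        intro m
        induction m with
        | zero => intro _; exact List.isChain_nil
        | succ m ihm =>
          intro hm
          rcases Nat.eq_zero_or_pos m with rfl | hm0
          · -- single block c = 1
            rw [pvDesc_succ]
            simp only [pvDesc, List.flatMap_cons, List.flatMap_nil, List.append_nil]
            exact hblock 1 (by omega) (by omega)
          · rcases Nat.eq_zero_or_pos k with rfl | hk0
            · -- k = 0 : at most the block c = r+1 is nonempty
              have hz : ∀ (mz : Nat), mz ≤ r → ∀ c ∈ pvDesc mz, (pvComps (r+1-c) 0).map (fun cs => c :: cs) = [] := by
                intro mz hmz c hc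
                have hcd := pvMem_desc.mp hc
                obtain ⟨d, hd⟩ : ∃ d, r+1-c = d+1 := ⟨r-c, by omega⟩
                rw [hd]; simp [pvComps]
              rcases Nat.lt_or_ge m r with hmr | hmr
              · rw [List.flatMap_eq_nil_iff.mpr (hz (m+1) (by omega)), List.map_nil]
                exact List.isChain_nil
              · have hm2 : m = r := by omega
                subst hm2
                rw [pvDesc_succ, List.flatMap_cons, List.flatMap_eq_nil_iff.mpr (hz m (le_refl _)),
                  List.append_nil, show m+1-(m+1) = 0 from by omega,
                  show pvComps 0 0 = [[]] from by simp [pvComps],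
                  List.map_cons, List.map_nil, List.map_cons, List.map_nil]
                exact List.isChain_singleton _
            · rw [pvDesc_succ, List.flatMap_cons, List.map_append]
              apply List.IsChain.append
              · exact hblock (m+1) (by omega) (by omega)
              · exact ihm (by omega)
              · intro x hx y hy
                -- x : last state of block (m+1); y : first state of block m
                rw [List.map_map, List.getLast?_map] at hx
                rw [pvComps_getLast (r+1-(m+1)) k (Or.inr hk0)] at hx
                simp only [Option.map_some, Option.mem_def, Option.some.injEq] at hx
                obtain ⟨rest, hrest⟩ := pvComps_head (r+1-m) k (by omega) hk0
                rw [pvDesc_pos m hm0, List.flatMap_cons, List.map_append, List.map_map] at hy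
                rw [List.head?_append_of_ne_nil _ (by rw [hrest]; simp)] at hy
                rw [hrest] at hy
                simp only [List.map_cons, List.head?_cons, Option.mem_def, Option.some.injEq] at hy
                subst hx
                subst hy
                simp only [Function.comp]
                -- boundary transition
                have hns := pvNoSplit_lastS n (r+1-(m+1)) k (start+1) (by push_cast at hs ⊢; omega) hk0
                rw [show start + 1 - 1 = start from by omega] at hns
                have hb := pvBoundarySucc n P (pvStateOf (start+1) (pvLastC (r+1-(m+1)) k)) start m
                  (by omega) (by push_cast at hs; omega) hns
                have hIlen : (pvStateOf (start+1) (pvLastC (r+1-(m+1)) k)).length = r-m := by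
                  rw [pvStateOf_length, pvLastC_sum _ _ hk0]; omega
                rw [hIlen] at hb
                have hL' : P.length + (m+1) + (r-m) = L := by omega
                rw [hL'] at hb
                have ht1 : P ++ pvStateOf start ((m+1) :: pvLastC (r+1-(m+1)) k)
                    = P ++ List.replicate (m+1) start ++ pvStateOf (start+1) (pvLastC (r+1-(m+1)) k) := by
                  rw [hrw]
                have ht2 : P ++ pvStateOf start (m :: [r+1-m])
                    = P ++ List.replicate m start ++ List.replicate (r-m+1) (start+1) := by
                  rw [hrw]
                  rw [show r+1-m = r-m+1 from by omega]
                  simp [pvStateOf]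
                rw [ht1, ht2]
                exact hb
      have := main (r+1) (le_refl _)
      exact this

theorem pvLoop_none (pool : List Int) (n : Int) (L : Nat) (t : List Int)
    (h : findSplit n t L = none) : ∀ f, pvLoop pool n L f t = [] := by
  intro f
  cases f with
  | zero => rfl
  | succ f => rw [pvLoop, h]

-- after the last state the scan finds no split position
theorem pvFindSplit_last (n' L : Nat) (hn : 1 ≤ n') (hL : 2 ≤ L) :
    findSplit (n' : Int) (pvStateOf 0 (pvLastC L n')) L = none := by
  set t := pvStateOf 0 (pvLastC L n') with ht
  have htlen : t.length = L := by rw [ht, pvStateOf_length, pvLastC_sum _ _ hn]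
  have hns : pvNoSplit (n' : Int) (-1) t := by
    have := pvNoSplit_lastS (n' : Int) L n' 0 (by push_cast; omega) hn
    rw [show (0 : Int) - 1 = -1 from by omega] at this
    exact this
  apply findSplit_eq_none
  intro j hj
  rcases Nat.eq_zero_or_pos j with rfl | hj1
  · -- position 0: compare t[0] = 0 with the last element
    rw [pvCond_zero]
    simp only [decide_eq_false_iff_not]
    intro hcontra
    rcases Nat.lt_or_ge n' 2 with hn1 | hn2
    · -- n' = 1 : t[0] = 0 = n'-1
      have h1 : n' = 1 := by omega
      subst h1
      apply hcontra.1
      have hl0 : pvLastC L 1 = [L] := by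
        match L, hL with
        | (l+1), _ => rfl
      rw [ht, hl0]
      have : pvStateOf 0 [L] = List.replicate L 0 := by simp [pvStateOf]
      rw [this, List.getElem?_replicate, if_pos (by omega)]
      norm_num
    · -- n' ≥ 2 : the last element is ≥ 1 but t[0] = 0
      have hl0 : pvLastC L n' = 1 :: pvLastC (L-1) (n'-1) := by
        match L, n', hL, hn2 with
        | (l+2), (m+2), _, _ => rfl
      have htc : t = 0 :: pvStateOf 1 (pvLastC (L-1) (n'-1)) := by
        rw [ht, hl0]; simp [pvStateOf]
      set rest := pvStateOf 1 (pvLastC (L-1) (n'-1)) with hrest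
      have hrne : rest ≠ [] := by
        have : rest.length = L - 1 := by
          rw [hrest, pvStateOf_length, pvLastC_sum _ _ (by omega)]
        intro hcon
        rw [hcon] at this
        simp at this
        omega
      have hlast : t.getLast? = rest.getLast? := by
        rw [htc]
        cases hc : rest with
        | nil => exact absurd hc hrne
        | cons b tl => rfl
      obtain ⟨v, hv⟩ := Option.ne_none_iff_exists'.mp (mt List.getLast?_eq_none_iff.mp hrne)
      have hv1 : 1 ≤ v := pvMem_stateOf_ge (List.mem_of_getLast? hv)
      have h0 : t[0]? = some 0 := by rw [htc]; rfl
      rw [h0, hlast, hv] at hcontra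
      have := hcontra.2
      injection this with hh
      omega
  · -- positions ≥ 1: inside the split-free suffix
    rcases Nat.lt_or_ge n' 2 with hn1 | hn2
    · have h1 : n' = 1 := by omega
      subst h1
      have hl0 : pvLastC L 1 = [L] := by
        match L, hL with
        | (l+1), _ => rfl
      rw [pvCond_eq _ _ j hj1 (by omega)]
      have hval : t[j]? = some 0 := by
        rw [ht, hl0, show pvStateOf 0 [L] = List.replicate L 0 from by simp [pvStateOf]]
        rw [List.getElem?_replicate, if_pos (by omega)]
      rw [hval]
      simp
    · have hl0 : pvLastC L n' = 1 :: pvLastC (L-1) (n'-1) := by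
        match L, n', hL, hn2 with
        | (l+2), (m+2), _, _ => rfl
      have htc : t = [0] ++ pvStateOf 1 (pvLastC (L-1) (n'-1)) := by
        rw [ht, hl0]; simp [pvStateOf]
      have hns' : pvNoSplit (n' : Int) 0 (pvStateOf 1 (pvLastC (L-1) (n'-1))) := by
        have := pvNoSplit_lastS (n' : Int) (L-1) (n'-1) 1 (by push_cast; omega) (by omega)
        rw [show (1 : Int) - 1 = 0 from by omega] at this
        exact this
      have := pvCond_false_of_noSplit (n' : Int) _ [0] 0 (by simp) (by simp) hns' j
        (by simp; omega)
        (by simp [pvStateOf_length, pvLastC_sum _ _ (show 1 ≤ n'-1 by omega)]; omega)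
      rw [htc]
      exact this

-- length = 1, pool nonempty: every later state is filtered out
theorem pvLoopOne (pool : List Int) (n : Int) (hn : 1 ≤ n) :
    ∀ (f : Nat) (j : Int), 0 ≤ j → j ≤ n - 1 → pvLoop pool n 1 f [j] = [] := by
  intro f
  induction f with
  | zero => intro j _ _; rfl
  | succ f ih =>
    intro j hj0 hjn
    rcases eq_or_ne j (n-1) with rfl | hne
    · apply pvLoop_none
      apply findSplit_eq_none
      intro i hi
      have : i = 0 := by omega
      subst this
      rw [pvCond_zero]
      simp
    · have hfind : findSplit n [j] 1 = some 0 := by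
        apply findSplit_eq_some 1 (by omega)
        · rw [pvCond_zero]
          simp [hne]
        · intro i hi1 hi2; omega
      have hupd : pvUpd [j] 0 = [j+1] := by
        rw [pvUpd_eq [j] 0 (by simp)]
        simp
      rw [pvLoop, hfind]
      simp only [hupd]
      have hpass : pvPass n [j+1] = false := by
        rw [Bool.eq_false_iff]
        intro htrue
        unfold pvPass at htrue
        rw [List.all_eq_true] at htrue
        have hcnt := htrue (j+1) (PySem.List.mem_pyRange_one.mpr ⟨by omega, by omega⟩)
        rw [Bool.not_eq_eq_eq_not, Bool.not_true, decide_eq_false_iff_not] at hcnt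
        apply hcnt
        rw [PySem.List.count_eq, PySem.List.count_eq]
        rw [show j + 1 - 1 = j from by omega]
        have h1 : List.count j [j+1] = 0 := by
          rw [List.count_eq_zero, List.mem_singleton]
          omega
        have h2 : List.count (j+1) [j+1] = 1 := by simp
        rw [h1, h2]
        omega
      rw [hpass]
      simp only [Bool.false_eq_true, if_false, List.nil_append]
      exact ih (j+1) (by omega) (by omega)

def pvNonIncr : List Nat → Bool
  | [] => true
  | [_] => true
  | a :: b :: t => (decide (b ≤ a)) && pvNonIncr (b :: t)

theorem pvNonIncr_iff (c : Nat) (cs : List Nat) :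
    pvNonIncr (c :: cs) = true ↔ (pvNonIncr cs = true ∧ ∀ x ∈ cs, x ≤ c) := by
  induction cs generalizing c with
  | nil => simp [pvNonIncr]
  | cons b t ih =>
    rw [show pvNonIncr (c :: b :: t) = ((decide (b ≤ c)) && pvNonIncr (b :: t)) from rfl]
    rw [Bool.and_eq_true, decide_eq_true_eq]
    constructor
    · rintro ⟨hbc, hbt⟩
      refine ⟨hbt, ?_⟩
      intro x hx
      rcases List.mem_cons.mp hx with rfl | hx
      · exact hbc
      · exact le_trans ((ih b).mp hbt |>.2 x hx) hbc
    · rintro ⟨hbt, hall⟩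
      exact ⟨hall b (by simp), hbt⟩

theorem pvNonIncr_adj (c : List Nat) :
    pvNonIncr c = true ↔ ∀ i, i+1 < c.length → c.getD (i+1) 0 ≤ c.getD i 0 := by
  induction c with
  | nil => simp [pvNonIncr]
  | cons a t ih =>
    cases t with
    | nil => simp [pvNonIncr]
    | cons b t2 =>
      rw [show pvNonIncr (a :: b :: t2) = ((decide (b ≤ a)) && pvNonIncr (b :: t2)) from rfl]
      rw [Bool.and_eq_true, decide_eq_true_eq, ih]
      constructor
      · rintro ⟨hba, hadj⟩ i hi
        match i with
        | 0 => simpa using hba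
        | i+1 =>
          have := hadj i (by simpa using hi)
          simpa using this
      · intro h
        refine ⟨by simpa using h 0 (by simp), ?_⟩
        intro i hi
        have := h (i+1) (by simpa using hi)
        simpa using this

theorem pvMem_stateOf_lt {x s : Int} {c : List Nat} (h : x ∈ pvStateOf s c) :
    x < s + c.length := by
  induction c generalizing s with
  | nil => simp [pvStateOf] at h
  | cons y ys ih =>
    rw [pvStateOf, List.mem_append] at h
    rcases h with h | h
    · rw [List.eq_of_mem_replicate h]
      have : 1 ≤ (y :: ys).length := by simp
      push_cast
      omega
    · have h2 := ih h
      have : ys.length + 1 = (y :: ys).length := by simp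
      push_cast at h2 ⊢
      omega

theorem pvCount_stateOf_lt (s v : Int) (c : List Nat) (h : v < s) :
    (pvStateOf s c).count v = 0 := by
  rw [List.count_eq_zero]
  intro hmem
  have := pvMem_stateOf_ge hmem
  omega

theorem pvCount_stateOf_ge (s v : Int) (c : List Nat) (h : s + c.length ≤ v) :
    (pvStateOf s c).count v = 0 := by
  rw [List.count_eq_zero]
  intro hmem
  have := pvMem_stateOf_lt hmem
  omega

theorem pvCount_stateOf_nth (c : List Nat) : ∀ (s : Int) (j : Nat), j < c.length →
    (pvStateOf s c).count (s + j) = c.getD j 0 := by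
  induction c with
  | nil => intro s j hj; simp at hj
  | cons x xs ih =>
    intro s j hj
    rw [pvStateOf, List.count_append]
    match j with
    | 0 =>
      rw [List.count_replicate]
      simp only [Nat.cast_zero, add_zero]
      rw [if_pos (by simp)]
      rw [pvCount_stateOf_lt (s+1) s xs (by omega)]
      simp [List.getD_cons_zero]
    | j+1 =>
      rw [List.count_replicate, if_neg (by simp; omega)]
      have := ih (s+1) j (by simpa using hj)
      rw [show s + ((j+1 : Nat) : Int) = (s+1) + (j : Int) from by push_cast; omega]
      rw [this]
      simp [List.getD_cons_succ]

theorem pvPass_stateOf (n' : Nat) (c : List Nat) (hlen : c.length ≤ n') :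
    pvPass (n' : Int) (pvStateOf 0 c) = pvNonIncr c := by
  rw [Bool.eq_iff_iff]
  unfold pvPass
  rw [List.all_eq_true, pvNonIncr_adj]
  have hcnt : ∀ (v : Int), PySem.List.count (pvStateOf 0 c) v = (pvStateOf 0 c).count v := by
    intro v; exact PySem.List.count_eq _ _
  constructor
  · intro h i hi
    have hji : (1:Int) ≤ (i:Int)+1 ∧ ((i:Int)+1) < n' := by
      constructor <;> [omega; (push_cast; omega)]
    have := h ((i:Int)+1) (PySem.List.mem_pyRange_one.mpr ⟨hji.1, hji.2⟩)
    rw [Bool.not_eq_eq_eq_not, Bool.not_true, decide_eq_false_iff_not, Nat.not_lt] at this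
    rw [hcnt, hcnt] at this
    rw [show (i:Int) + 1 - 1 = (0:Int) + i from by omega] at this
    rw [show (i:Int) + 1 = (0:Int) + (i+1 : Nat) from by push_cast; omega] at this
    rw [pvCount_stateOf_nth c 0 i (by omega), pvCount_stateOf_nth c 0 (i+1) hi] at this
    exact this
  · intro h j hj
    obtain ⟨hj1, hj2⟩ := PySem.List.mem_pyRange_one.mp hj
    rw [Bool.not_eq_eq_eq_not, Bool.not_true, decide_eq_false_iff_not, Nat.not_lt]
    rw [hcnt, hcnt]
    set jn := j.toNat with hjn
    have hjcast : j = (jn : Int) := by omega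
    rcases Nat.lt_or_ge jn c.length with hlt | hge
    · have hjn1 : 1 ≤ jn := by omega
      rw [show j = (0:Int) + (jn : Int) from by omega]
      rw [pvCount_stateOf_nth c 0 jn hlt]
      rw [show (0:Int) + (jn:Int) - 1 = (0:Int) + ((jn - 1 : Nat) : Int) from by push_cast; omega]
      rw [pvCount_stateOf_nth c 0 (jn-1) (by omega)]
      have := h (jn-1) (by omega)
      rw [show jn - 1 + 1 = jn from by omega] at this
      exact this
    · rw [pvCount_stateOf_ge 0 j c (by push_cast; omega)]
      omega

-- the casts from Nat compositions to Int part lists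
def pvCast : List Nat → List Int
  | [] => []
  | x :: xs => (x : Int) :: pvCast xs

theorem pvCast_cons (x : Nat) (xs : List Nat) : pvCast (x :: xs) = (x : Int) :: pvCast xs := rfl

-- the tuple built from a composition is the same on both sides
theorem pvBuild_foldl (pool : List Int) (c : List Nat) : ∀ (q : Nat) (acc : List Int),
    (PySem.List.enumerate (pvCast c) (q : Int)).foldl
      (fun out kp => out ++ List.replicate kp.2.toNat ((PySem.List.pyGet? pool kp.1).getD 0)) acc
    = acc ++ pvTuple pool (pvStateOf (q : Int) c) := by
  induction c with
  | nil => intro q acc; simp [pvCast, PySem.List.enumerate_nil, pvStateOf, pvTuple]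
  | cons x xs ih =>
    intro q acc
    rw [pvCast_cons, PySem.List.enumerate_cons, List.foldl_cons]
    rw [show ((q:Int) + 1) = ((q+1 : Nat) : Int) from by push_cast; omega]
    rw [ih (q+1)]
    rw [pvStateOf]
    unfold pvTuple
    rw [List.map_append, List.map_replicate]
    simp only [Int.toNat_natCast]
    rw [List.append_assoc]
    push_cast
    rfl

theorem pvBuild_eq (pool : List Int) (c : List Nat) :
    pvBuild pool (pvCast c) = pvTuple pool (pvStateOf 0 c) := by
  unfold pvBuild
  have := pvBuild_foldl pool c 0 []
  simpa using this

theorem pvDesc_split (a b : Nat) (h : b ≤ a) :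
    ∃ seg, pvDesc a = seg ++ pvDesc b ∧ ∀ c ∈ seg, b < c := by
  induction a with
  | zero =>
    have : b = 0 := by omega
    subst this
    exact ⟨[], rfl, by simp⟩
  | succ a ih =>
    rcases Nat.eq_or_lt_of_le h with rfl | hlt
    · exact ⟨[], rfl, by simp⟩
    · obtain ⟨seg, hseg, hmem⟩ := ih (by omega)
      refine ⟨(a+1) :: seg, ?_, ?_⟩
      · rw [pvDesc_succ, hseg]; rfl
      · intro c hc
        rcases List.mem_cons.mp hc with rfl | hc
        · omega
        · exact hmem c hc

theorem pvRange_countdown (m : Nat) :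
    PySem.List.pyRange (m : Int) 0 (-1) = pvCast (pvDesc m) := by
  induction m with
  | zero => rw [PySem.List.pyRange_neg_one_eq_nil (by omega)]; rfl
  | succ m ih =>
    rw [PySem.List.pyRange_neg_one_cons (by push_cast; omega)]
    rw [show ((m+1 : Nat) : Int) - 1 = (m : Int) from by push_cast; omega]
    rw [ih, pvDesc_succ, pvCast_cons]

theorem pvFlatMap_filter {α β : Type} (p : α → Bool) (g : α → β) (l : List α) :
    l.flatMap (fun a => if p a then [g a] else []) = (l.filter p).map g := by
  induction l with
  | nil => rfl
  | cons x xs ih =>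
    rw [List.flatMap_cons, List.filter_cons]
    by_cases hx : p x
    · rw [if_pos hx, if_pos hx, List.map_cons, ih]; rfl
    · rw [if_neg hx, if_neg hx, ih]; rfl

theorem pvFlatMap_cast {β : Type} (g : Int → List β) (l : List Nat) :
    (pvCast l).flatMap g = l.flatMap (fun (cn : Nat) => g ((cn : Nat) : Int)) := by
  induction l with
  | nil => rfl
  | cons x xs ih => rw [pvCast_cons, List.flatMap_cons, List.flatMap_cons, ih]

theorem pvPred_cons (c : Nat) (cs : List Nat) (mp : Int) :
    (pvNonIncr (c :: cs) && (c :: cs).all (fun x => decide ((x:Int) ≤ mp)))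
      = (decide ((c:Int) ≤ mp) && (pvNonIncr cs && cs.all (fun x => decide ((x:Int) ≤ (c:Int))))) := by
  rw [Bool.eq_iff_iff]
  simp only [Bool.and_eq_true, decide_eq_true_eq, List.all_eq_true, pvNonIncr_iff,
    decide_eq_true_eq]
  constructor
  · rintro ⟨⟨hni, hle⟩, hall⟩
    refine ⟨hall c (by simp), hni, ?_⟩
    intro x hx
    have := hle x hx
    push_cast
    omega
  · rintro ⟨hcmp, hni, hall⟩
    refine ⟨⟨hni, ?_⟩, ?_⟩
    · intro x hx
      have := hall x hx
      push_cast at this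
      omega
    · intro x hx
      rcases List.mem_cons.mp hx with rfl | hx
      · exact hcmp
      · have := hall x hx
        omega

theorem pvParts_eq : ∀ (r : Nat) (mp : Int) (k : Nat),
    pvParts (r : Int) mp (k : Int)
      = ((pvComps r k).filter
          (fun c => pvNonIncr c && c.all (fun x => decide ((x:Int) ≤ mp)))).map pvCast := by
  intro r
  induction r using Nat.strong_induction_on with
  | _ r ih =>
    intro mp k
    match r with
    | 0 =>
      rw [pvParts, dif_pos (by norm_num)]
      rw [show pvComps 0 k = [[]] from by simp [pvComps]]
      rw [List.filter_cons, show (pvNonIncr [] && ([] : List Nat).all (fun x => decide ((x:Int) ≤ mp))) = true from rfl]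
      rfl
    | r+1 =>
      rw [pvParts, dif_neg (by push_cast; omega)]
      match k with
      | 0 =>
        rw [if_pos (by norm_num)]
        rw [show pvComps (r+1) 0 = [] from by simp [pvComps]]
        rfl
      | k+1 =>
        rw [if_neg (by push_cast; omega)]
        rw [pvFlatMap_attach (PySem.List.pyRange (min (((r+1 : Nat)) : Int) mp) 0 (-1))
          (fun p => List.map (fun rest => p :: rest) (pvParts (((r+1 : Nat) : Int) - p) p (((k+1 : Nat) : Int) - 1)))]
        rcases Int.lt_or_le mp 1 with hmp | hmp
        · -- mp ≤ 0 : no partition fits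
          rw [show min ((r+1 : Nat) : Int) mp = mp from by push_cast; omega]
          rw [PySem.List.pyRange_neg_one_eq_nil (by omega)]
          rw [List.flatMap_nil]
          rw [List.filter_eq_nil_iff.mpr ?side]
          · rfl
          case side =>
            intro c hc
            obtain ⟨hsum, hpos, _⟩ := pvMem_comps hc
            match c with
            | [] => simp at hsum
            | c0 :: cs =>
              intro hcon
              rw [Bool.and_eq_true, List.all_eq_true] at hcon
              have := hcon.2 c0 (by simp)
              rw [decide_eq_true_eq] at this
              have := hpos c0 (by simp)
              omega
        · -- mp ≥ 1
          set mN := (min ((r+1 : Nat) : Int) mp).toNat with hmN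
          have hmin : min ((r+1 : Nat) : Int) mp = (mN : Int) := by push_cast; omega
          have hmN1 : 1 ≤ mN := by push_cast at hmin ⊢; omega
          have hmNr : mN ≤ r+1 := by push_cast at hmin ⊢; omega
          rw [hmin, pvRange_countdown mN]
          rw [pvComps_succ]
          obtain ⟨seg, hseg, hsegmem⟩ := pvDesc_split (r+1) mN hmNr
          rw [hseg, List.flatMap_append, List.filter_append, List.map_append]
          have hdead : ((seg.flatMap (fun c => (pvComps (r+1-c) k).map (fun cs => c :: cs))).filter
              (fun c => pvNonIncr c && c.all (fun x => decide ((x:Int) ≤ mp)))) = [] := by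
            rw [List.filter_eq_nil_iff]
            intro c hc
            rw [List.mem_flatMap] at hc
            obtain ⟨c0, hc0, hc⟩ := hc
            obtain ⟨cs, _, rfl⟩ := List.mem_map.mp hc
            have hgt : mN < c0 := hsegmem c0 hc0
            intro hcon
            rw [Bool.and_eq_true, List.all_eq_true] at hcon
            have hle := hcon.2 c0 (by simp)
            rw [decide_eq_true_eq] at hle
            have hc0r : c0 ≤ r+1 :=
              (pvMem_desc.mp (by rw [hseg]; exact List.mem_append_left _ hc0)).2
            omega
          rw [hdead, List.map_nil, List.nil_append]
          -- remaining: the two flatMaps over pvDesc mN agree block by block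
          rw [pvFlatMap_cast]
          rw [List.filter_flatMap, List.map_flatMap]
          apply List.flatMap_congr
          intro c0 hc0
          obtain ⟨hc01, hc0m⟩ := pvMem_desc.mp hc0
          have hc0mp : (c0 : Int) ≤ mp := by
            have h2 : (mN:Int) ≤ mp := by omega
            omega
          rw [show ((r+1:Nat):Int) - (c0:Int) = ((r+1-c0 : Nat) : Int) from by push_cast; omega]
          rw [show ((k+1:Nat):Int) - 1 = (k:Int) from by push_cast; omega]
          rw [ih (r+1-c0) (by omega) (c0:Int) k]
          rw [List.filter_map]
          have hpred : ∀ cs ∈ pvComps (r+1-c0) k,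
              ((fun c => pvNonIncr c && c.all fun x => decide ((x:Int) ≤ mp)) ∘ (fun cs => c0 :: cs)) cs
                = (pvNonIncr cs && cs.all (fun x => decide ((x:Int) ≤ (c0:Int)))) := by
            intro cs _
            simp only [Function.comp]
            rw [pvPred_cons c0 cs mp]
            rw [show decide ((c0:Int) ≤ mp) = true from decide_eq_true hc0mp, Bool.true_and]
          rw [List.filter_congr hpred]
          rw [List.map_map, List.map_map]
          apply List.map_congr_left
          intro cs _
          simp only [Function.comp]
          rw [pvCast_cons]

-- A's full output is the filtered walk over all compositions
theorem pvAChar (pool : List Int) (L n' : Nat) (hn : 1 ≤ n') (hL : 1 ≤ L) :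
    pvTuple pool (List.replicate L 0) :: pvLoop pool (n' : Int) L (2^L) (List.replicate L 0)
      = pvYields pool (n' : Int) ((pvComps L n').map (pvStateOf 0)) := by
  obtain ⟨rest, hcomps⟩ := pvComps_head L n' hL hn
  have hhead : pvStateOf 0 [L] = List.replicate L 0 := by simp [pvStateOf]
  rw [hcomps, List.map_cons, hhead, pvYields_cons]
  have hpass : pvPass (n' : Int) (List.replicate L 0) = true := by
    rw [← hhead, pvPass_stateOf n' [L] (by simpa using hn)]
    rfl
  rw [hpass, if_pos rfl]
  rw [List.singleton_append]
  congr 1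
  -- the loop produces exactly the yields of the remaining states
  have hchain := pvChainComps (n' : Int) L L n' [] 0 (by push_cast; omega) (by simp)
  have hfun : (fun c => ([] : List Int) ++ pvStateOf 0 c) = pvStateOf 0 := by
    funext c; rw [List.nil_append]
  rw [hfun, hcomps, List.map_cons, hhead] at hchain
  set restS := rest.map (pvStateOf 0) with hrestS
  have hlen : restS.length + (2^L - restS.length) = 2^L := by
    have h1 : (pvComps L n').length ≤ 2^L := pvComps_length_le L n'
    rw [hcomps] at h1
    simp only [List.length_cons] at h1
    have h2 : restS.length = rest.length := by rw [hrestS, List.length_map]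
    omega
  rw [← hlen]
  rw [pvRun pool (n' : Int) L restS (List.replicate L 0) (2^L - restS.length) hchain]
  have hlast : (List.replicate L 0 :: restS).getLast (by simp) = pvStateOf 0 (pvLastC L n') := by
    have h1 : (pvComps L n').getLast? = some (pvLastC L n') := pvComps_getLast L n' (Or.inr hn)
    have h2 : ((pvComps L n').map (pvStateOf 0)).getLast? = some (pvStateOf 0 (pvLastC L n')) := by
      rw [List.getLast?_map, h1]; rfl
    rw [hcomps, List.map_cons, hhead] at h2
    rw [List.getLast?_eq_getLast] at h2
    · injection h2
    · simp
  rw [hlast]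
  have hend : pvLoop pool (n' : Int) L (2^L - restS.length) (pvStateOf 0 (pvLastC L n')) = [] := by
    rcases Nat.lt_or_ge L 2 with hL1 | hL2
    · have : L = 1 := by omega
      subst this
      have h1 : pvLastC 1 n' = [1] := by
        match n', hn with
        | 1, _ => rfl
        | (m+2), _ => rfl
      rw [h1, show pvStateOf 0 [1] = [0] from by simp [pvStateOf]]
      exact pvLoopOne pool (n' : Int) (by push_cast; omega) _ 0 (by omega) (by push_cast; omega)
    · exact pvLoop_none pool _ L _ (pvFindSplit_last n' L hn hL2) _
  rw [hend, List.append_nil]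

-- B's output is the same filtered walk
theorem pvBChar (pool : List Int) (L n' : Nat) (hn : 1 ≤ n') (hL : 1 ≤ L) :
    ((pvParts (L : Int) (L : Int) (n' : Int)).map (pvBuild pool))
      = pvYields pool (n' : Int) ((pvComps L n').map (pvStateOf 0)) := by
  rw [pvParts_eq L (L : Int) n']
  have hfc : (pvComps L n').filter (fun c => pvNonIncr c && c.all (fun x => decide ((x:Int) ≤ (L:Int))))
      = (pvComps L n').filter pvNonIncr := by
    apply List.filter_congr
    intro c hc
    obtain ⟨hsum, hpos, hlen⟩ := pvMem_comps hc
    have hall : c.all (fun x => decide ((x:Int) ≤ (L:Int))) = true := by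
      rw [List.all_eq_true]
      intro x hx
      rw [decide_eq_true_eq]
      have : x ≤ c.sum := List.le_sum_of_mem hx
      push_cast
      omega
    rw [hall, Bool.and_true]
  rw [hfc]
  unfold pvYields
  have hfm : ((pvComps L n').map (pvStateOf 0)).flatMap
        (fun t => if pvPass (n' : Int) t then [pvTuple pool t] else [])
      = (pvComps L n').flatMap
        (fun c => if pvNonIncr c then [pvTuple pool (pvStateOf 0 c)] else []) := by
    rw [List.flatMap_map]
    apply List.flatMap_congr
    intro c hc
    obtain ⟨hsum, hpos, hlen⟩ := pvMem_comps hc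
    show (if pvPass (n' : Int) (pvStateOf 0 c) then [pvTuple pool (pvStateOf 0 c)] else []) = _
    rw [pvPass_stateOf n' c hlen]
  rw [hfm]
  rw [pvFlatMap_filter pvNonIncr (fun c => pvTuple pool (pvStateOf 0 c)) (pvComps L n')]
  rw [List.map_map]
  apply List.map_congr_left
  intro c _
  simp only [Function.comp]
  rw [pvBuild_eq]

theorem pvMain (iterable : List Int) (length : Int) :
    newtermlists iterable length = newtermlists_alt iterable length := by
  unfold newtermlists newtermlists_alt
  by_cases hg : iterable.length = 0 ∧ length ≠ 0
  · rw [if_pos (by exact_mod_cast hg), if_pos hg]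
  · rw [if_neg (by push_cast at hg ⊢; exact_mod_cast hg), if_neg hg]
    rcases Int.lt_or_le 0 length with hpos | hneg
    · -- length ≥ 1
      have hn : 1 ≤ iterable.length := by
        rcases Nat.eq_zero_or_pos iterable.length with h0 | h1
        · exact absurd ⟨h0, by omega⟩ hg
        · omega
      set L := length.toNat with hLdef
      have hL1 : 1 ≤ L := by omega
      have hAc := pvAChar iterable L iterable.length hn hL1
      have hBc := pvBChar iterable L iterable.length hn hL1
      rw [hAc]
      rw [show ((L : Nat) : Int) = length from by omega] at hBc
      rw [hBc]
    · -- length ≤ 0 : a single empty tuple on both sides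
      rw [show length.toNat = 0 from by omega]
      rw [pvParts, dif_pos hneg]
      show pvTuple iterable (List.replicate 0 0)
          :: pvLoop iterable (iterable.length : Int) 0 (2^0) (List.replicate 0 0)
        = List.map (pvBuild iterable) [[]]
      rfl
-- ===== VERDICT (by name: the statement is the Claim_ definition above) =====
theorem newtermlists_spec : Claim_equal_newtermlists := by
  intro iterable length _
  unfold Spec_newtermlists
  exact pvMain iterable length
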